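-- pv_equiv track=rewrite | github.com/mbdevpl/transpyle | setup_boilerplate.py | partition_version_classifiers
-- ===== SOURCE A (Python) =====
-- import typing as t
--
-- def partition_version_classifiers(
--         classifiers: t.Sequence[str], version_prefix: str = 'Programming Language :: Python :: ',
--         only_suffix: str = ' :: Only') -> t.Tuple[t.List[str], t.List[str]]:
--     """Find version number classifiers in given list and partition them into 2 groups."""
--     versions_min, versions_only = [], []
--     for classifier in classifiers:
--         version = classifier.replace(version_prefix, '')
--         versions = versions_min
--         if version.endswith(only_suffix):
--             version = version.replace(only_suffix, '')
--             versions = versions_only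
--         try:
--             versions.append(tuple([int(_) for _ in version.split('.')]))
--         except ValueError:
--             pass
--     return versions_min, versions_only
-- ===== SOURCE B (Python) =====
-- def partition_version_classifiers(
--         classifiers, version_prefix='Programming Language :: Python :: ',
--         only_suffix=' :: Only'):
--     """Find version number classifiers in given list and partition them into 2 groups."""
--     def parse(text):
--         try:
--             return tuple(int(part) for part in text.split('.'))
--         except ValueError:
--             return None
--
--     def solve(items):
--         if len(items) == 0:
--             return [], []
--         if len(items) == 1:
--             version = items[0].replace(version_prefix, '')
--             if version.endswith(only_suffix):
--                 tup = parse(version.replace(only_suffix, ''))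
--                 return ([], []) if tup is None else ([], [tup])
--             tup = parse(version)
--             return ([], []) if tup is None else ([tup], [])
--         mid = len(items) // 2
--         left_min, left_only = solve(items[:mid])
--         right_min, right_only = solve(items[mid:])
--         return left_min + right_min, left_only + right_only
--
--     return solve(list(classifiers))
-- ===== Notes on version B (the rewrite author's own statement) =====
-- stated objective: alternative
-- what changed: Replaces A's single left-to-right loop that appends each parsed tuple into a selected accumulator list by a divide-and-conquer recursion: split the list in halves, partition each half independently, and concatenate the per-half results (order is preserved because concatenation of sub-partitions respects the original order).
import Mathlib
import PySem

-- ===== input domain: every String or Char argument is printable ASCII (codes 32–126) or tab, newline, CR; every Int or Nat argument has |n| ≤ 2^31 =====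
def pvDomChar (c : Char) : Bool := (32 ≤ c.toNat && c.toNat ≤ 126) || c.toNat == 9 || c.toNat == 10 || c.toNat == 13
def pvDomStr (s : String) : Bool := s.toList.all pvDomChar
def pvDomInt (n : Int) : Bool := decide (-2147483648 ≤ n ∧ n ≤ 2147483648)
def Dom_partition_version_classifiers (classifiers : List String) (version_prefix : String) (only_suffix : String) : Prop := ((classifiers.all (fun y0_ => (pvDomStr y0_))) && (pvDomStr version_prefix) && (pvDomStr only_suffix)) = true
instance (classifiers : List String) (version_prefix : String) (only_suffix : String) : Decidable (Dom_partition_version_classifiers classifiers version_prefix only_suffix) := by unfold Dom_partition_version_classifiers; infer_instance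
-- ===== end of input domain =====

-- B replaces A's single accumulator loop by a divide-and-conquer recursion over halves,
-- concatenating per-half partitions; same result, different decomposition (no speed claim).

-- ===== PORT A =====
-- try: versions.append(tuple([int(_) for _ in version.split('.')])) except ValueError: pass
def pvTryParseA (version : String) : Option (List Int) :=
  (PySem.Chars.splitOn version.toList ['.']).mapM PySem.Int.ofChars?

-- the body of A's for-loop: pick the target list, parse, append (skip on ValueError)
def pvStepA (version_prefix only_suffix : String) (st : List (List Int) × List (List Int)) (classifier : String) : List (List Int) × List (List Int) :=
  let version := PySem.Str.replace classifier version_prefix ""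
  if PySem.Str.endswith version only_suffix then
    match pvTryParseA (PySem.Str.replace version only_suffix "") with
    | some tup => (st.1, st.2 ++ [tup])
    | none => st
  else
    match pvTryParseA version with
    | some tup => (st.1 ++ [tup], st.2)
    | none => st

def partition_version_classifiers (classifiers : List String) (version_prefix : String) (only_suffix : String) : List (List Int) × List (List Int) :=
  classifiers.foldl (pvStepA version_prefix only_suffix) ([], [])

-- ===== PORT B =====
-- parse(text): tuple(int(part) for part in text.split('.')) under try, None on ValueError
def pvParseB (text : String) : Option (List Int) :=
  (PySem.Chars.splitOn text.toList ['.']).mapM PySem.Int.ofChars?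

-- solve(items): split in halves, solve each, concatenate the two partitions
def pvSolveB (version_prefix only_suffix : String) : List String → List (List Int) × List (List Int)
  | [] => ([], [])
  | [c] =>
    let version := PySem.Str.replace c version_prefix ""
    if PySem.Str.endswith version only_suffix then
      match pvParseB (PySem.Str.replace version only_suffix "") with
      | none => ([], [])
      | some tup => ([], [tup])
    else
      match pvParseB version with
      | none => ([], [])
      | some tup => ([tup], [])
  | c1 :: c2 :: rest =>
    let mid := (c1 :: c2 :: rest).length / 2
    let left := pvSolveB version_prefix only_suffix ((c1 :: c2 :: rest).take mid)
    let right := pvSolveB version_prefix only_suffix ((c1 :: c2 :: rest).drop mid)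
    (left.1 ++ right.1, left.2 ++ right.2)
termination_by cs => cs.length
decreasing_by
  · simp [List.length_take]; omega
  · simp [List.length_drop]; omega

def partition_version_classifiers_alt (classifiers : List String) (version_prefix : String) (only_suffix : String) : List (List Int) × List (List Int) :=
  pvSolveB version_prefix only_suffix classifiers

-- ===== PRECONDITION & SPEC =====
def Spec_partition_version_classifiers (classifiers : List String) (version_prefix : String) (only_suffix : String) (out : List (List Int) × List (List Int)) : Prop := out = partition_version_classifiers_alt classifiers version_prefix only_suffix
instance (classifiers : List String) (version_prefix : String) (only_suffix : String) (out : List (List Int) × List (List Int)) : Decidable (Spec_partition_version_classifiers classifiers version_prefix only_suffix out) := by unfold Spec_partition_version_classifiers; infer_instance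

-- ===== CLAIM (what is proved, stated in full; the proofs are below) =====
def Claim_equal_partition_version_classifiers : Prop := ∀ (classifiers : List String) (version_prefix : String) (only_suffix : String), Dom_partition_version_classifiers classifiers version_prefix only_suffix → Spec_partition_version_classifiers classifiers version_prefix only_suffix (partition_version_classifiers classifiers version_prefix only_suffix)

-- ===== LEMMAS AND PROOFS =====

-- characterisation of both programs: the per-element contribution to each list
def pvFMin (version_prefix only_suffix : String) (c : String) : Option (List Int) :=
  let v := PySem.Str.replace c version_prefix ""
  if PySem.Str.endswith v only_suffix then none else pvTryParseA v

def pvFOnly (version_prefix only_suffix : String) (c : String) : Option (List Int) :=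
  let v := PySem.Str.replace c version_prefix ""
  if PySem.Str.endswith v only_suffix then pvTryParseA (PySem.Str.replace v only_suffix "") else none

-- A's fold, started from any accumulators, appends exactly the filterMap contributions
lemma foldA_eq (classifiers : List String) (version_prefix only_suffix : String)
    (acc1 acc2 : List (List Int)) :
    classifiers.foldl (pvStepA version_prefix only_suffix) (acc1, acc2)
    = (acc1 ++ classifiers.filterMap (pvFMin version_prefix only_suffix),
       acc2 ++ classifiers.filterMap (pvFOnly version_prefix only_suffix)) := by
  induction classifiers generalizing acc1 acc2 with
  | nil => simp
  | cons c cs ih =>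
    simp only [List.foldl_cons, List.filterMap_cons]
    cases h : PySem.Chars.endswith (PySem.Chars.replace c.toList version_prefix.toList []) only_suffix.toList with
    | true =>
      cases hp : pvTryParseA (PySem.Str.replace (PySem.Str.replace c version_prefix "") only_suffix "") with
      | none =>
        have hs : pvStepA version_prefix only_suffix (acc1, acc2) c = (acc1, acc2) := by
          simp [pvStepA, h, hp]
        rw [hs, ih]; simp [pvFMin, pvFOnly, h, hp]
      | some tup =>
        have hs : pvStepA version_prefix only_suffix (acc1, acc2) c = (acc1, acc2 ++ [tup]) := by
          simp [pvStepA, h, hp]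
        rw [hs, ih]; simp [pvFMin, pvFOnly, h, hp]
    | false =>
      cases hp : pvTryParseA (PySem.Str.replace c version_prefix "") with
      | none =>
        have hs : pvStepA version_prefix only_suffix (acc1, acc2) c = (acc1, acc2) := by
          simp [pvStepA, h, hp]
        rw [hs, ih]; simp [pvFMin, pvFOnly, h, hp]
      | some tup =>
        have hs : pvStepA version_prefix only_suffix (acc1, acc2) c = (acc1 ++ [tup], acc2) := by
          simp [pvStepA, h, hp]
        rw [hs, ih]; simp [pvFMin, pvFOnly, h, hp]

-- B's divide-and-conquer computes the same filterMap characterisation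
lemma solveB_eq_aux (version_prefix only_suffix : String) (n : Nat) :
    ∀ cs : List String, cs.length ≤ n →
    pvSolveB version_prefix only_suffix cs
    = (cs.filterMap (pvFMin version_prefix only_suffix),
       cs.filterMap (pvFOnly version_prefix only_suffix)) := by
  induction n with
  | zero =>
    intro cs hlen
    have : cs = [] := List.length_eq_zero_iff.mp (Nat.le_zero.mp hlen)
    subst this
    simp [pvSolveB]
  | succ n ih =>
    intro cs hlen
    match cs with
    | [] => simp [pvSolveB]
    | [c] =>
      rw [pvSolveB]
      cases h : PySem.Chars.endswith (PySem.Chars.replace c.toList version_prefix.toList []) only_suffix.toList with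
      | true =>
        cases hp : pvParseB (PySem.Str.replace (PySem.Str.replace c version_prefix "") only_suffix "") with
        | none => simp [pvFMin, pvFOnly, pvTryParseA, pvParseB] at hp ⊢; simp [h, hp]
        | some tup => simp [pvFMin, pvFOnly, pvTryParseA, pvParseB] at hp ⊢; simp [h, hp]
      | false =>
        cases hp : pvParseB (PySem.Str.replace c version_prefix "") with
        | none => simp [pvFMin, pvFOnly, pvTryParseA, pvParseB] at hp ⊢; simp [h, hp]
        | some tup => simp [pvFMin, pvFOnly, pvTryParseA, pvParseB] at hp ⊢; simp [h, hp]
    | c1 :: c2 :: rest =>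
      rw [pvSolveB]
      have h1 : ((c1 :: c2 :: rest).take ((c1 :: c2 :: rest).length / 2)).length ≤ n := by
        simp only [List.length_take, List.length_cons] at *
        omega
      have h2 : ((c1 :: c2 :: rest).drop ((c1 :: c2 :: rest).length / 2)).length ≤ n := by
        simp only [List.length_drop, List.length_cons] at *
        omega
      rw [ih _ h1, ih _ h2]
      simp only [← List.filterMap_append, List.take_append_drop]

lemma solveB_eq (version_prefix only_suffix : String) (classifiers : List String) :
    pvSolveB version_prefix only_suffix classifiers
    = (classifiers.filterMap (pvFMin version_prefix only_suffix),
       classifiers.filterMap (pvFOnly version_prefix only_suffix)) :=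
  solveB_eq_aux version_prefix only_suffix classifiers.length classifiers le_rfl

-- ===== VERDICT (by name: the statement is the Claim_ definition above) =====
theorem partition_version_classifiers_spec : Claim_equal_partition_version_classifiers := by
  intro classifiers version_prefix only_suffix _
  unfold Spec_partition_version_classifiers partition_version_classifiers
    partition_version_classifiers_alt
  rw [foldA_eq, solveB_eq]
  simp
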